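-- pv_equiv track=rewrite | github.com/thabir303/Agentic-AI | backend/authentication/agentic_views.py | is_issue_query
-- ===== SOURCE A (Python) =====
-- def is_issue_query(query):
--     """Determine if the query is about reporting an issue - more flexible detection"""
--     issue_keywords = [
--         'issue', 'problem', 'bug', 'error', 'complaint', 'not working',
--         'broken', 'fail', 'wrong', 'help', 'support', 'trouble', 'report',
--         'complain', 'fix', 'solve', 'sorry', 'apologize', 'fault'
--     ]
--     query_lower = query.lower()
--
--     # Check for issue patterns
--     issue_patterns = [
--         'i have',
--         'there is',
--         'can you help',
--         'need help',
--         'facing',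
--         'experiencing',
--         "isn't functioning",
--         'not working properly',
--     ]
--
--     # Check keywords and patterns
--     has_issue_keyword = any(keyword in query_lower for keyword in issue_keywords)
--     has_issue_pattern = any(pattern in query_lower for pattern in issue_patterns)
--
--     return has_issue_keyword or has_issue_pattern
-- ===== SOURCE B (Python) =====
-- _ISSUE_TERMS = [
--     'issue', 'problem', 'bug', 'error', 'complaint', 'not working',
--     'broken', 'fail', 'wrong', 'help', 'support', 'trouble', 'report',
--     'complain', 'fix', 'solve', 'sorry', 'apologize', 'fault',
--     'i have', 'there is', 'can you help', 'need help', 'facing',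
--     'experiencing', "isn't functioning", 'not working properly',
-- ]
--
-- # First-character index: maps a character to the terms starting with it, built once.
-- _INDEX = {}
-- for _t in _ISSUE_TERMS:
--     _INDEX.setdefault(_t[0], []).append(_t)
--
-- def is_issue_query(query):
--     """Determine if the query is about reporting an issue - more flexible detection"""
--     s = query.lower()
--     for i, c in enumerate(s):
--         for t in _INDEX.get(c, ()):
--             if s.startswith(t, i):
--                 return True
--     return False
-- ===== Notes on version B (the rewrite author's own statement) =====
-- stated objective: alternative
-- what changed: Instead of scanning the string once per term (A's two any()-over-term-lists substring membership tests), B builds a first-character dict index over the merged term list once and makes a single left-to-right pass over the lowered query, checking at each position only the terms filed under that position's character with startswith.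
import Mathlib
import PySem

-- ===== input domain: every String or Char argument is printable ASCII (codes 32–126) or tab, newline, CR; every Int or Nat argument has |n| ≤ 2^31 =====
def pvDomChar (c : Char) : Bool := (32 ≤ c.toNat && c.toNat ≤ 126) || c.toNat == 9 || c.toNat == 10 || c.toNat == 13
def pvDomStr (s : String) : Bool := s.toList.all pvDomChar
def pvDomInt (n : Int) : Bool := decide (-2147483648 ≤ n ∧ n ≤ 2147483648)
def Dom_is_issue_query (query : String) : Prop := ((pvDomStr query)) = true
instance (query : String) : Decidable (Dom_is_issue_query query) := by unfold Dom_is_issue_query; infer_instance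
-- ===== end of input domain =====

-- B replaces A's per-term substring scans by a single left-to-right pass over the
-- lowered query, checking at each position only the terms filed under that position's
-- first character in a dict index built once (objective: alternative; return value only).

-- ===== PORT A =====
def pvIssueKeywords : List String :=
  ["issue", "problem", "bug", "error", "complaint", "not working",
   "broken", "fail", "wrong", "help", "support", "trouble", "report",
   "complain", "fix", "solve", "sorry", "apologize", "fault"]

def pvIssuePatterns : List String :=
  ["i have", "there is", "can you help", "need help", "facing",
   "experiencing", "isn't functioning", "not working properly"]

def is_issue_query (query : String) : Bool :=
  let query_lower := PySem.Str.lower query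
  let has_issue_keyword := pvIssueKeywords.any (fun keyword => PySem.Str.isIn keyword query_lower)
  let has_issue_pattern := pvIssuePatterns.any (fun pattern => PySem.Str.isIn pattern query_lower)
  has_issue_keyword || has_issue_pattern

-- ===== PORT B =====
def pvIssueTerms : List String :=
  ["issue", "problem", "bug", "error", "complaint", "not working",
   "broken", "fail", "wrong", "help", "support", "trouble", "report",
   "complain", "fix", "solve", "sorry", "apologize", "fault",
   "i have", "there is", "can you help", "need help", "facing",
   "experiencing", "isn't functioning", "not working properly"]

-- t[0]; exact here since every term in the literal list is nonempty
def pvFirstChar (t : String) : Char := t.toList.headD ' '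

-- _INDEX[c] = _INDEX.get(c, []) + [t] over the term list (Source B's module-level loop)
def pvIndex : PySem.Dict Char (List String) :=
  pvIssueTerms.foldl
    (fun d t => PySem.Dict.modify d (pvFirstChar t) [] (fun l => l ++ [t]))
    PySem.Dict.empty

-- the 'for i, c in enumerate(s)' loop with early return: recursion over the suffixes;
-- s.startswith(t, i) is 't.toList.isPrefixOf (current suffix)'
def pvScan (s : List Char) : Bool :=
  match s with
  | [] => false
  | c :: rest =>
      (PySem.Dict.getD pvIndex c []).any (fun t => t.toList.isPrefixOf (c :: rest))
      || pvScan rest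

def is_issue_query_alt (query : String) : Bool :=
  pvScan (PySem.Str.lower query).toList

-- ===== PRECONDITION & SPEC =====
def Spec_is_issue_query (query : String) (out : Bool) : Prop := out = is_issue_query_alt query
instance (query : String) (out : Bool) : Decidable (Spec_is_issue_query query out) := by unfold Spec_is_issue_query; infer_instance

-- ===== CLAIM (what is proved, stated in full; the proofs are below) =====
def Claim_equal_is_issue_query : Prop := ∀ (query : String), Dom_is_issue_query query → Spec_is_issue_query query (is_issue_query query)

-- ===== LEMMAS AND PROOFS =====
theorem pvIssueTerms_eq_append : pvIssueTerms = pvIssueKeywords ++ pvIssuePatterns := rfl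

-- the index maps c to exactly the terms whose first character is c
theorem pvBucket_eq (c : Char) :
    PySem.Dict.getD pvIndex c [] = pvIssueTerms.filter (fun t => pvFirstChar t == c) := by
  have h : pvIndex = (pvIssueTerms.map (fun t => (pvFirstChar t, t))).foldl
      (fun d p => PySem.Dict.modify d p.1 [] (fun l => l ++ [p.2])) PySem.Dict.empty := by
    rw [List.foldl_map]; rfl
  rw [h, PySem.Dict.getD_foldl_modify_append, PySem.Dict.getD_empty]
  simp [List.filter_map, Function.comp_def]

theorem pvAny_congr_mem {α : Type} (l : List α) (p q : α → Bool)
    (h : ∀ a ∈ l, p a = q a) : l.any p = l.any q := by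
  induction l with
  | nil => rfl
  | cons a l ih =>
    simp only [List.any_cons, h a (List.mem_cons_self),
      ih (fun b hb => h b (List.mem_cons_of_mem a hb))]

theorem pvAny_or {α : Type} (l : List α) (p q : α → Bool) :
    l.any (fun x => p x || q x) = (l.any p || l.any q) := by
  induction l with
  | nil => simp
  | cons a l ih => simp [List.any_cons, ih]; cases p a <;> cases q a <;> simp

theorem pvIsIn_cons (t : List Char) (c : Char) (r : List Char) :
    PySem.Chars.isIn t (c :: r) = (t.isPrefixOf (c :: r) || PySem.Chars.isIn t r) := by
  rw [Bool.eq_iff_iff]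
  simp only [Bool.or_eq_true, ← PySem.Chars.exists_prefix_drop_iff_isIn,
    List.isPrefixOf_iff_prefix]
  constructor
  · rintro ⟨j, hj⟩
    cases j with
    | zero => exact Or.inl hj
    | succ j => exact Or.inr ⟨j, hj⟩
  · rintro (h | ⟨j, hj⟩)
    · exact ⟨0, h⟩
    · exact ⟨j + 1, hj⟩

-- restricting to the first-character bucket loses no prefix match
theorem pvBucket_any (c : Char) (r : List Char) :
    (PySem.Dict.getD pvIndex c []).any (fun t => t.toList.isPrefixOf (c :: r))
      = pvIssueTerms.any (fun t => t.toList.isPrefixOf (c :: r)) := by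
  rw [pvBucket_eq, List.any_filter]
  apply pvAny_congr_mem
  intro t ht
  have hne : t.toList ≠ [] := by fin_cases ht <;> decide
  cases hx : t.toList with
  | nil => exact absurd hx hne
  | cons x xs =>
    have hfc : pvFirstChar t = x := by unfold pvFirstChar; rw [hx]; rfl
    rw [hfc]
    simp only [List.isPrefixOf]
    cases x == c <;> simp

theorem pvScan_eq (s : List Char) :
    pvScan s = pvIssueTerms.any (fun t => PySem.Chars.isIn t.toList s) := by
  induction s with
  | nil => decide
  | cons c rest ih =>
    simp only [pvScan]
    rw [pvBucket_any, ih, ← pvAny_or]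
    apply pvAny_congr_mem
    intro t _
    rw [pvIsIn_cons]

-- ===== VERDICT (by name: the statement is the Claim_ definition above) =====
theorem is_issue_query_spec : Claim_equal_is_issue_query := by
  intro query _
  unfold Spec_is_issue_query is_issue_query is_issue_query_alt
  rw [pvScan_eq, pvIssueTerms_eq_append, List.any_append]
  simp [PySem.Str.isIn_eq]
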